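-- pv_equiv track=rewrite | github.com/jhkang1517/algo | 2021-W05/ternary.py | solution
-- ===== SOURCE A (Python) =====
-- def solution(n):
--     answer = ''
--     sum = 0
--
--     while True:
--
--         # 2021.07.26 비효율적...
--         if n == 1:
--             return 1
--
--         elif n == 2:
--             return 2
--
--         rmn = n % 3
--         answer += str(rmn)
--         n = n // 3
--
--         if n < 3:
--             answer += str(n)
--             break
--
--     for i in range((len(answer)-1),-1,-1):
--         sum += ((3 ** i) * int(answer[::-1][i]))
--
--     return sum
-- ===== SOURCE B (Python) =====
-- def solution(n):
--     # Horner pass over the ternary digits: accumulating r = r*3 + (n % 3)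
--     # while peeling digits reverses them by construction, with no
--     # intermediate digit string and no 3**i reconstruction.
--     r = 0
--     while n > 0:
--         r = r * 3 + n % 3
--         n //= 3
--     return r
-- ===== Notes on version B (the rewrite author's own statement) =====
-- stated objective: simpler
-- what changed: Replaces A's two phases (build a digit string, then reconstruct the reversed value with 3**i powers and string indexing) by a single Horner accumulator loop r = r*3 + n%3; n //= 3.
import Mathlib
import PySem

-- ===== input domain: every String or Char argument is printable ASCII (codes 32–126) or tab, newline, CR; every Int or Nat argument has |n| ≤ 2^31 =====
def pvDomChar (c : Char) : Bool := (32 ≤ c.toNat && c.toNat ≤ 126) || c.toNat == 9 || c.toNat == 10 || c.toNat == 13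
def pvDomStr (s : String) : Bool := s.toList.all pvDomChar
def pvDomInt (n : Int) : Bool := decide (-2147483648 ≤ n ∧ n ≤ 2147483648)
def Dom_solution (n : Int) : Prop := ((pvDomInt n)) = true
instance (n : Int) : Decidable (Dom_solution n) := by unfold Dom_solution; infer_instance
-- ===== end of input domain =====

-- B replaces A's build-a-digit-string-then-reconstruct-with-3**i phases by a single
-- Horner accumulator loop (simpler, one pass, no intermediate string).

-- ===== PORT A =====
-- the 'while True' loop of A: state (n, answer); returns either an early return value
-- (the 'return 1' / 'return 2' branches) or the final answer string (as List Char)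
def solutionLoop (n : Int) (answer : List Char) : Int ⊕ List Char :=
  if n = 1 then Sum.inl 1
  else if n = 2 then Sum.inl 2
  else
    let rmn := PySem.Int.mod n 3
    let answer2 := answer ++ PySem.Int.toChars rmn      -- answer += str(rmn)
    let n2 := PySem.Int.floordiv n 3                    -- n = n // 3
    if n2 < 3 then Sum.inr (answer2 ++ PySem.Int.toChars n2)
    else solutionLoop n2 answer2
termination_by n.toNat
decreasing_by
  have hd : PySem.Int.floordiv n 3 = n / 3 := PySem.Int.floordiv_eq_ediv_of_pos (by norm_num)
  omega

-- the 'for i in range(len(answer)-1, -1, -1)' summation of A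
-- 3 ** i is 3 ^ i.toNat (i ≥ 0 over this range);
-- the .getD defaults stand for IndexError (never hit: i is in range) and
-- ValueError of int() (only hit for n < 0, excluded by Pre_)
def sumLoopA (answer : List Char) : Int :=
  (PySem.List.pyRange ((answer.length : Int) - 1) (-1) (-1)).foldl
    (fun sum i =>
      sum + 3 ^ i.toNat *
        ((PySem.Int.ofChars?
            [(PySem.List.pyGet? ((PySem.List.slice? answer none none (-1)).getD []) i).getD ' ']).getD 0))
    0

def solution (n : Int) : Int :=
  match solutionLoop n [] with
  | Sum.inl v => v
  | Sum.inr answer => sumLoopA answer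

-- ===== PORT B =====
-- the 'while n > 0' Horner loop of B
def altLoop (n : Int) (r : Int) : Int :=
  if 0 < n then altLoop (PySem.Int.floordiv n 3) (r * 3 + PySem.Int.mod n 3) else r
termination_by n.toNat
decreasing_by
  have hd : PySem.Int.floordiv n 3 = n / 3 := PySem.Int.floordiv_eq_ediv_of_pos (by norm_num)
  omega

def solution_alt (n : Int) : Int := altLoop n 0

-- ===== PRECONDITION & SPEC =====
-- Pre_ excludes n < 0, on which A raises ValueError (int('-') while reconstructing).
def Pre_solution (n : Int) : Prop := 0 ≤ n
instance (n : Int) : Decidable (Pre_solution n) := by unfold Pre_solution; infer_instance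
def pvWitness_solution : Int := (5)

def Spec_solution (n : Int) (out : Int) : Prop := out = solution_alt n
instance (n : Int) (out : Int) : Decidable (Spec_solution n out) := by unfold Spec_solution; infer_instance

-- ===== CLAIM (what is proved, stated in full; the proofs are below) =====
def Claim_equal_solution : Prop := ∀ (n : Int), Dom_solution n → Pre_solution n → Spec_solution n (solution n)

-- ===== LEMMAS AND PROOFS =====

-- value of a digit character
def dv (c : Char) : Int := (c.toNat : Int) - 48
-- Horner value of a digit string read left to right
def hv (cs : List Char) : Int := cs.foldl (fun r c => r * 3 + dv c) 0
-- all characters are ternary digits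
def allDig (cs : List Char) : Prop := ∀ c ∈ cs, c = '0' ∨ c = '1' ∨ c = '2'

theorem hv_foldl (cs : List Char) (r : Int) :
    cs.foldl (fun r c => r * 3 + dv c) r = r * 3 ^ cs.length + hv cs := by
  induction cs generalizing r with
  | nil => simp [hv]
  | cons c t ih =>
    show (t.foldl _ (r * 3 + dv c)) = _
    rw [ih]
    have : hv (c :: t) = (dv c) * 3 ^ t.length + hv t := by
      show t.foldl _ (0 * 3 + dv c) = _
      rw [ih]; ring_nf
    rw [this, List.length_cons, pow_succ]; ring

theorem hv_append_singleton (cs : List Char) (c : Char) :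
    hv (cs ++ [c]) = hv cs * 3 + dv c := by
  simp [hv, List.foldl_append]

theorem hv_eq_sum (cs : List Char) :
    hv cs = ((List.range cs.length).map
      (fun k => 3 ^ (cs.length - 1 - k) * dv (cs.getD k ' '))).sum := by
  induction cs with
  | nil => simp [hv]
  | cons c t ih =>
    have h1 : hv (c :: t) = dv c * 3 ^ t.length + hv t := by
      show t.foldl _ (0 * 3 + dv c) = _
      rw [hv_foldl]; ring_nf
    rw [h1, List.length_cons, List.range_succ_eq_map, List.map_cons, List.map_map, List.sum_cons]
    have h2 : ((List.range t.length).map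
        ((fun k => 3 ^ (t.length + 1 - 1 - k) * dv ((c :: t).getD k ' ')) ∘ Nat.succ)).sum
        = ((List.range t.length).map
        (fun k => 3 ^ (t.length - 1 - k) * dv (t.getD k ' '))).sum := by
      apply congrArg
      apply List.map_congr_left
      intro k hk
      simp only [Function.comp]
      have : t.length + 1 - 1 - (k + 1) = t.length - 1 - k := by omega
      rw [this]
      rfl
    rw [h2, ← ih]
    simp
    ring

theorem sumLoopA_eq (cs : List Char) (h : allDig cs) : sumLoopA cs = hv cs := by
  unfold sumLoopA
  rw [PySem.List.slice?_none_none_neg_one, Option.getD_some, PySem.List.pyRange_neg_one]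
  have hL : ((cs.length : Int) - 1 - (-1)).toNat = cs.length := by omega
  rw [hL, List.foldl_map, PySem.List.foldl_add]
  rw [hv_eq_sum cs, zero_add]
  apply congrArg
  apply List.map_congr_left
  intro k hk
  rw [List.mem_range] at hk
  have hnn : (0:Int) ≤ (cs.length : Int) - 1 - (k : Int) := by omega
  rw [PySem.List.pyGet?_of_nonneg _ hnn]
  have ht : ((cs.length : Int) - 1 - (k : Int)).toNat = cs.length - 1 - k := by omega
  rw [ht]
  have hlt : cs.length - 1 - k < cs.length := by omega
  rw [List.getElem?_reverse (by simpa using hlt)]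
  have hidx : cs.length - 1 - (cs.length - 1 - k) = k := by omega
  simp only [hidx]
  rw [List.getElem?_eq_getElem hk, Option.getD_some]
  have hc := h cs[k] (List.getElem_mem hk)
  have hg : cs.getD k ' ' = cs[k] := List.getD_eq_getElem cs ' ' hk
  rw [hg]
  rcases hc with h0 | h0 | h0 <;> rw [h0] <;> congr 1

def resSum : Int ⊕ List Char → Int
  | Sum.inl v => v
  | Sum.inr ans => sumLoopA ans

theorem allDig_append (cs : List Char) (c : Char) (h : allDig cs)
    (hc : c = '0' ∨ c = '1' ∨ c = '2') : allDig (cs ++ [c]) := by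
  intro x hx
  rcases List.mem_append.mp hx with hx | hx
  · exact h x hx
  · simp at hx; subst hx; exact hc

theorem altLoop_zero (r : Int) : altLoop 0 r = r := by
  rw [altLoop.eq_def]; simp

theorem loop_eq (n : Int) (acc : List Char) (h3 : 3 ≤ n) (hacc : allDig acc) :
    resSum (solutionLoop n acc) = altLoop n (hv acc) := by
  rw [solutionLoop.eq_def, altLoop.eq_def]
  have hn1 : ¬ n = 1 := by omega
  have hn2 : ¬ n = 2 := by omega
  have hpos : 0 < n := by omega
  simp only [hn1, hn2, hpos, if_true, if_false]
  have hmod : PySem.Int.mod n 3 = n % 3 := PySem.Int.mod_eq_emod_of_pos (by omega)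
  have hdiv : PySem.Int.floordiv n 3 = n / 3 := PySem.Int.floordiv_eq_ediv_of_pos (by omega)
  have hm : n % 3 = 0 ∨ n % 3 = 1 ∨ n % 3 = 2 := by omega
  have hq1 : 1 ≤ n / 3 := by omega
  have hchar : ∀ r : Int, r = 0 ∨ r = 1 ∨ r = 2 →
      PySem.Int.toChars r = [Char.ofNat (48 + r.toNat)] ∧
      (Char.ofNat (48 + r.toNat) = '0' ∨ Char.ofNat (48 + r.toNat) = '1' ∨
        Char.ofNat (48 + r.toNat) = '2') ∧ dv (Char.ofNat (48 + r.toNat)) = r := by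
    intro r hr
    rcases hr with h | h | h <;> subst h <;> exact ⟨by decide, by decide, by decide⟩
  obtain ⟨hmc, hmdig, hmdv⟩ := hchar (PySem.Int.mod n 3) (by omega)
  set cm := Char.ofNat (48 + (PySem.Int.mod n 3).toNat) with hcm
  by_cases hq : PySem.Int.floordiv n 3 < 3
  · simp only [hq, if_true]
    obtain ⟨hqc, hqdig, hqdv⟩ := hchar (PySem.Int.floordiv n 3) (by omega)
    set cq := Char.ofNat (48 + (PySem.Int.floordiv n 3).toNat) with hcq
    show sumLoopA ((acc ++ PySem.Int.toChars (PySem.Int.mod n 3)) ++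
        PySem.Int.toChars (PySem.Int.floordiv n 3)) = _
    rw [hmc, hqc]
    rw [sumLoopA_eq _ (allDig_append _ _ (allDig_append _ _ hacc hmdig) hqdig)]
    rw [hv_append_singleton, hv_append_singleton, hmdv, hqdv]
    -- B side: two more iterations of altLoop then stop
    have hq12 : PySem.Int.floordiv n 3 = 1 ∨ PySem.Int.floordiv n 3 = 2 := by omega
    rw [altLoop.eq_def]
    have : 0 < PySem.Int.floordiv n 3 := by omega
    simp only [this, if_true]
    rcases hq12 with h | h <;> rw [h] <;>
      rw [show PySem.Int.floordiv _ 3 = 0 from by rw [PySem.Int.floordiv_eq_ediv_of_pos (by omega)]; omega,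
          show PySem.Int.mod _ 3 = _ from PySem.Int.mod_eq_emod_of_pos (by omega),
          altLoop_zero] <;> norm_num
  · simp only [hq, if_false]
    have hqn : (PySem.Int.floordiv n 3).toNat < n.toNat := by omega
    rw [hmc]
    rw [loop_eq (PySem.Int.floordiv n 3) (acc ++ [cm]) (by omega)
        (allDig_append _ _ hacc hmdig)]
    rw [hv_append_singleton, hmdv]
termination_by n.toNat
decreasing_by omega

-- ===== VERDICT (by name: the statement is the Claim_ definition above) =====
theorem solution_spec : Claim_equal_solution := by
  intro n _ hpre
  unfold Spec_solution
  have h : n = 0 ∨ n = 1 ∨ n = 2 ∨ 3 ≤ n := by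
    unfold Pre_solution at hpre; omega
  rcases h with h | h | h | h
  · subst h
    have e : solutionLoop 0 [] = Sum.inr ['0', '0'] := by
      rw [solutionLoop.eq_def]; decide
    have ha : solution_alt 0 = 0 := by
      unfold solution_alt; rw [altLoop_zero]
    unfold solution; rw [e, ha]; decide
  · subst h
    have e : solutionLoop 1 [] = Sum.inl 1 := by
      rw [solutionLoop.eq_def]; decide
    have ha : solution_alt 1 = 1 := by
      unfold solution_alt
      rw [altLoop.eq_def]
      norm_num
      rw [altLoop_zero]
    unfold solution; rw [e, ha]
  · subst h
    have e : solutionLoop 2 [] = Sum.inl 2 := by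
      rw [solutionLoop.eq_def]; decide
    have ha : solution_alt 2 = 2 := by
      unfold solution_alt
      rw [altLoop.eq_def]
      norm_num
      rw [altLoop_zero]
    unfold solution; rw [e, ha]
  · have := loop_eq n [] h (by intro c hc; simp at hc)
    have hsol : solution n = resSum (solutionLoop n []) := by
      unfold solution resSum
      cases solutionLoop n [] <;> rfl
    rw [hsol, this]
    show altLoop n (hv []) = solution_alt n
    have : hv ([] : List Char) = 0 := rfl
    rw [this]; rfl
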